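-- pv_equiv track=rewrite | github.com/clairemoorecantwell/GSR_Learning | allomorph_distribution.py | syllable_structure
-- ===== SOURCE A (Python) =====
-- vowels = ['a', 'o', 'i', 'u', 'e']
--
-- def syllable_structure (root_form):
--
--
--     syll_structure =[] #initialize list to store syll structure
--
--     for i in range (0,len(root_form)):
--
--        if root_form[i] in vowels: #found a vowel
--            if i==(len(root_form)-1): #last vowel -> L
--                syll_structure.append("L")
--            else:                     # not the last vowel
--                if root_form [i+1] == ":": # if its a long vowel -> H
--                    syll_structure.append("H")
--                else:                     # short vowel ->L
--                    syll_structure.append("L")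
--
--
--
--
--     syll_str_string = "".join(syll_structure) #join into a string
--
--     return syll_str_string
-- ===== SOURCE B (Python) =====
-- vowels = ['a', 'o', 'i', 'u', 'e']
--
-- def _count_vowels(seg):
--     return sum(c in vowels for c in seg)
--
-- def _part(seg):
--     # contribution of a segment that was followed by ':' in the original string
--     n = _count_vowels(seg)
--     if seg and seg[-1] in vowels:
--         return 'L' * (n - 1) + 'H'   # the segment-final vowel preceded the ':' -> heavy
--     return 'L' * n
--
-- def syllable_structure(root_form):
--     # split on the length mark; heaviness is a property of segment boundaries
--     segments = root_form.split(':')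
--     parts = [_part(seg) for seg in segments[:-1]]
--     parts.append('L' * _count_vowels(segments[-1]))
--     return ''.join(parts)
-- ===== Notes on version B (the rewrite author's own statement) =====
-- stated objective: alternative
-- what changed: Replaces A's indexed scan with one-character lookahead and a last-index special case by a staged algorithm: split the string on ':' and emit per segment one 'L' for each vowel, with the final vowel of a non-last segment becoming 'H' because it preceded the colon.
import Mathlib
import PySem

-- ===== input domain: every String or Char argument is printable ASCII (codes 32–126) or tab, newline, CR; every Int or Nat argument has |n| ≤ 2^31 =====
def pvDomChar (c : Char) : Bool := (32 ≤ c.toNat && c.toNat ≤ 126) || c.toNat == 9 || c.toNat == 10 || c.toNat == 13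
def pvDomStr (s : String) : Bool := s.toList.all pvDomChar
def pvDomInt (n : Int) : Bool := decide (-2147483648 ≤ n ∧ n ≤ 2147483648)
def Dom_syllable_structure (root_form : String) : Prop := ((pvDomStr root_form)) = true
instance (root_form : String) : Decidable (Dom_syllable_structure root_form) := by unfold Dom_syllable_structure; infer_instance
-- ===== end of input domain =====

-- B replaces A's indexed scan with lookahead by a staged algorithm: split the string on ':' and
-- emit, per segment, an 'L' for each vowel, turning the final vowel of a non-last segment into 'H'
-- (it preceded the colon); alternative decomposition, same asymptotic cost.

-- ===== PORT A =====
-- A: for i in range(0, len(s)): if s[i] in vowels: last index -> "L"; elif s[i+1]==':' -> "H"; else "L".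
-- Indices accessed are always in range, so pyGetD with a dummy default is exact here.
def syllable_structure (root_form : String) : String :=
  let l := root_form.toList
  let syll_structure := (PySem.List.pyRange 0 (l.length : Int) 1).foldl (fun acc i =>
    if PySem.List.pyGetD l i ' ' ∈ ['a', 'o', 'i', 'u', 'e'] then
      if i = (l.length : Int) - 1 then acc ++ ["L"]
      else if PySem.List.pyGetD l (i + 1) ' ' = ':' then acc ++ ["H"]
      else acc ++ ["L"]
    else acc) []
  PySem.Str.join "" syll_structure

-- ===== PORT B =====
def pvVowels : List Char := ['a', 'o', 'i', 'u', 'e']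

-- sum(c in vowels for c in seg): a 0/1 sum is a count
def pvCountV (seg : List Char) : Nat := seg.countP (fun c => decide (c ∈ pvVowels))

-- exact hand port of str.split(':') (explicit single-character separator)
def pvSplitColon : List Char → List (List Char)
  | [] => [[]]
  | c :: r =>
    if c = ':' then [] :: pvSplitColon r
    else match pvSplitColon r with
      | s :: ss => (c :: s) :: ss
      | [] => [[c]]

-- contribution of a non-last segment: 'L'*(n-1)+'H' if it ends in a vowel, else 'L'*n
def pvHeadPart (seg : List Char) : List Char :=
  match seg.getLast? with
  | some c =>
      if c ∈ pvVowels then List.replicate (pvCountV seg - 1) 'L' ++ ['H']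
      else List.replicate (pvCountV seg) 'L'
  | none => List.replicate (pvCountV seg) 'L'

def syllable_structure_alt (root_form : String) : String :=
  let segments := pvSplitColon root_form.toList
  let parts := segments.dropLast.map (fun seg => String.ofList (pvHeadPart seg))
  let parts := parts ++ [String.ofList (List.replicate (pvCountV (segments.getLastD [])) 'L')]
  PySem.Str.join "" parts

-- ===== PRECONDITION & SPEC =====
def Spec_syllable_structure (root_form : String) (out : String) : Prop := out = syllable_structure_alt root_form
instance (root_form : String) (out : String) : Decidable (Spec_syllable_structure root_form out) := by unfold Spec_syllable_structure; infer_instance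

-- ===== CLAIM (what is proved, stated in full; the proofs are below) =====
def Claim_equal_syllable_structure : Prop := ∀ (root_form : String), Dom_syllable_structure root_form → Spec_syllable_structure root_form (syllable_structure root_form)

-- ===== LEMMAS AND PROOFS =====

-- proof-side recursive view of B's per-segment parts list
def pvParts : List (List Char) → List String
  | [] => []
  | [seg] => [String.ofList (List.replicate (pvCountV seg) 'L')]
  | seg :: rest => String.ofList (pvHeadPart seg) :: pvParts rest

theorem pvParts_eq (segs : List (List Char)) (h : segs ≠ []) :
    segs.dropLast.map (fun seg => String.ofList (pvHeadPart seg)) ++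
      [String.ofList (List.replicate (pvCountV (segs.getLastD [])) 'L')] = pvParts segs := by
  induction segs with
  | nil => cases h rfl
  | cons a rest ih =>
      cases rest with
      | nil => simp [pvParts]
      | cons b rs =>
          rw [List.dropLast_cons₂, List.map_cons, List.cons_append,
            show (a :: b :: rs).getLastD [] = (b :: rs).getLastD [] by
              simp [List.getLastD_cons],
            ih (by simp)]
          rfl


-- per-character contribution of A at index k, phrased on the suffix starting at k
def pvSpecA : List Char → List String
  | [] => []
  | c :: rest =>
    (if c ∈ ['a', 'o', 'i', 'u', 'e'] then
       [if rest.head? = some ':' then "H" else "L"]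
     else []) ++ pvSpecA rest

def pvSpecC : List Char → List Char
  | [] => []
  | c :: rest =>
    (if c ∈ pvVowels then
       [if rest.head? = some ':' then 'H' else 'L']
     else []) ++ pvSpecC rest

theorem pvFoldA_suffix (l : List Char) (k : Nat) (acc : List String) (hk : k ≤ l.length) :
    (PySem.List.pyRange (k : Int) (l.length : Int) 1).foldl (fun acc i =>
      if PySem.List.pyGetD l i ' ' ∈ ['a', 'o', 'i', 'u', 'e'] then
        if i = (l.length : Int) - 1 then acc ++ ["L"]
        else if PySem.List.pyGetD l (i + 1) ' ' = ':' then acc ++ ["H"]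
        else acc ++ ["L"]
      else acc) acc = acc ++ pvSpecA (l.drop k) := by
  induction hn : l.length - k generalizing k acc with
  | zero =>
      have hk' : k = l.length := by omega
      subst hk'
      rw [List.drop_length]
      have hempty : PySem.List.pyRange (l.length : Int) (l.length : Int) 1 = [] := by
        simp [PySem.List.pyRange]
      rw [hempty]
      simp [pvSpecA]
  | succ n ih =>
      have hklt : k < l.length := by omega
      rw [PySem.List.pyRange_one_cons (by exact_mod_cast hklt), List.foldl_cons]
      rw [show ((k : Int) + 1) = ((k + 1 : Nat) : Int) by push_cast; ring]
      rw [ih (k + 1) _ (by omega) (by omega)]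
      have hc : PySem.List.pyGetD l (k : Int) ' ' = l[k] := by
        rw [PySem.List.pyGetD_natCast]
        simp [hklt, List.getD]
      have hdrop : l.drop k = l[k] :: l.drop (k + 1) := List.drop_eq_getElem_cons hklt
      simp only [hc]
      by_cases hv : l[k] ∈ ['a', 'o', 'i', 'u', 'e']
      · rw [if_pos hv]
        by_cases hlast : k = l.length - 1
        · have hki : (k : Int) = (l.length : Int) - 1 := by omega
          rw [if_pos hki]
          have hd2 : l.drop (k + 1) = [] := List.drop_eq_nil_of_le (by omega)
          rw [hdrop, hd2]
          simp [pvSpecA, hv]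
        · have hki : ¬ ((k : Int) = (l.length : Int) - 1) := by omega
          rw [if_neg hki]
          have hk1 : k + 1 < l.length := by omega
          have hnext : PySem.List.pyGetD l ((k + 1 : Nat) : Int) ' ' = l[k + 1] := by
            rw [PySem.List.pyGetD_natCast]
            simp [hk1, List.getD]
          have hd2 : l.drop (k + 1) = l[k + 1] :: l.drop (k + 2) := List.drop_eq_getElem_cons hk1
          rw [hnext, hdrop, hd2]
          by_cases hcol : l[k + 1] = ':'
          · rw [if_pos hcol]
            simp [pvSpecA, hv, hcol]
          · rw [if_neg hcol]
            simp [pvSpecA, hv, List.getElem?_eq_getElem hk1, hcol]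
      · rw [if_neg hv, hdrop]
        simp [pvSpecA, hv]

-- join with empty separator is flatten
theorem pvJoinE (ps : List (List Char)) : PySem.Chars.join [] ps = ps.flatten := by
  induction ps with
  | nil => simp [PySem.Chars.join_nil]
  | cons p qs ih =>
      cases qs with
      | nil => simp [PySem.Chars.join_singleton]
      | cons q rs => rw [PySem.Chars.join_cons_cons, ih]; simp

theorem pvSpecA_chars (l : List Char) :
    ((pvSpecA l).map String.toList).flatten = pvSpecC l := by
  induction l with
  | nil => rfl
  | cons c rest ih =>
      by_cases hv : c ∈ ['a', 'o', 'i', 'u', 'e']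
      · by_cases hcol : rest.head? = some ':' <;>
          simp [pvSpecA, pvSpecC, hv, pvVowels, hcol, ih]
      · simp [pvSpecA, pvSpecC, hv, pvVowels, ih]

theorem pvSpecC_no_colon (l : List Char) (h : ':' ∉ l) :
    pvSpecC l = List.replicate (pvCountV l) 'L' := by
  induction l with
  | nil => rfl
  | cons c r ih =>
      have hr : ':' ∉ r := fun hm => h (List.mem_cons_of_mem _ hm)
      have hhd : r.head? ≠ some ':' := by
        intro hh
        cases r with
        | nil => simp at hh
        | cons d t => simp at hh; exact hr (hh ▸ List.mem_cons_self)
      by_cases hv : c ∈ pvVowels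
      · simp [pvSpecC, hv, hhd, ih hr, pvCountV, List.countP_cons, List.replicate_succ]
      · simp [pvSpecC, hv, ih hr, pvCountV, List.countP_cons]

theorem pvCountV_pos_of_last_vowel (seg : List Char) (c : Char) (hlast : seg.getLast? = some c)
    (hv : c ∈ pvVowels) : 1 ≤ pvCountV seg :=
  List.countP_pos_iff.mpr ⟨c, List.mem_of_getLast? hlast, by simp [hv]⟩

theorem pvSpecC_seg_colon (seg rest : List Char) (h : ':' ∉ seg) :
    pvSpecC (seg ++ ':' :: rest) = pvHeadPart seg ++ pvSpecC rest := by
  induction seg with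
  | nil =>
      simp [pvSpecC, pvHeadPart, pvCountV, pvVowels]
  | cons c s ih =>
      have hs : ':' ∉ s := fun hm => h (List.mem_cons_of_mem _ hm)
      have ih' := ih hs
      cases s with
      | nil =>
          by_cases hv : c ∈ pvVowels
          · simp [pvSpecC, pvHeadPart, pvCountV, List.countP_cons, hv, (by decide : ':' ∉ pvVowels)]
          · simp [pvSpecC, pvHeadPart, pvCountV, List.countP_cons, hv, (by decide : ':' ∉ pvVowels)]
      | cons d t =>
          have hd : d ≠ ':' := fun hd => hs (hd ▸ List.mem_cons_self)
          have hlast : (c :: d :: t).getLast? = (d :: t).getLast? := by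
            simp [List.getLast?_cons_cons]
          obtain ⟨e, he⟩ : ∃ e, (d :: t).getLast? = some e := by
            cases hg : (d :: t).getLast? with
            | none => simp at hg
            | some e => exact ⟨e, rfl⟩
          have hcount : pvCountV (c :: d :: t) = pvCountV (d :: t) + (if c ∈ pvVowels then 1 else 0) := by
            simp [pvCountV, List.countP_cons]
          have hhead : pvHeadPart (c :: d :: t) = (if c ∈ pvVowels then ['L'] else []) ++ pvHeadPart (d :: t) := by
        -- case on whether the common last char is a vowel
            unfold pvHeadPart
            rw [hlast, he]
            by_cases hev : e ∈ pvVowels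
            · have h1 : 1 ≤ pvCountV (d :: t) := pvCountV_pos_of_last_vowel _ _ he hev
              by_cases hv : c ∈ pvVowels
              · simp [hev, hv, hcount]
                conv_lhs => rw [show pvCountV (d :: t) = (pvCountV (d :: t) - 1) + 1 from by omega]
                simp [List.replicate_succ]
              · simp [hev, hv, hcount]
            · by_cases hv : c ∈ pvVowels <;> simp [hev, hv, hcount, List.replicate_succ]
          have hstep : pvSpecC (c :: ((d :: t) ++ ':' :: rest)) =
              (if c ∈ pvVowels then
                 [if ((d :: t) ++ ':' :: rest).head? = some ':' then 'H' else 'L'] else []) ++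
              pvSpecC ((d :: t) ++ ':' :: rest) := rfl
          rw [List.cons_append, hstep, ih', hhead]
          by_cases hv : c ∈ pvVowels <;> simp [hv, hd]

theorem pvSplitColon_ne_nil (l : List Char) : pvSplitColon l ≠ [] := by
  cases l with
  | nil => simp [pvSplitColon]
  | cons c r =>
      unfold pvSplitColon
      by_cases h : c = ':'
      · simp [h]
      · simp only [h, if_false]
        cases hs : pvSplitColon r <;> simp

theorem pvSplitColon_no_colon (l : List Char) (h : ':' ∉ l) : pvSplitColon l = [l] := by
  induction l with
  | nil => rfl
  | cons c r ih =>
      have hc : ¬ (c = ':') := fun hc => h (hc ▸ List.mem_cons_self)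
      have hr : pvSplitColon r = [r] := ih (fun hm => h (List.mem_cons_of_mem _ hm))
      simp [pvSplitColon, hc, hr]

theorem pvSplitColon_append (seg rest : List Char) (h : ':' ∉ seg) :
    pvSplitColon (seg ++ ':' :: rest) = seg :: pvSplitColon rest := by
  induction seg with
  | nil => simp [pvSplitColon]
  | cons c s ih =>
      have hc : ¬ (c = ':') := fun hc => h (hc ▸ List.mem_cons_self)
      have hs : pvSplitColon (s ++ ':' :: rest) = s :: pvSplitColon rest :=
        ih (fun hm => h (List.mem_cons_of_mem _ hm))
      simp [pvSplitColon, hc, hs]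

theorem pvParts_flat (l : List Char) :
    ((pvParts (pvSplitColon l)).map String.toList).flatten = pvSpecC l := by
  induction hn : l.length using Nat.strong_induction_on generalizing l with
  | _ n ih =>
  subst hn
  by_cases hc : ':' ∈ l
  · have hdec := List.takeWhile_append_dropWhile (p := fun c => decide (c ≠ ':')) (l := l)
    have hne : l.dropWhile (fun c => decide (c ≠ ':')) ≠ [] := by
      intro h0
      rw [h0, List.append_nil] at hdec
      have := List.mem_takeWhile_imp (hdec ▸ hc)
      simp at this
    obtain ⟨d, t, hdt⟩ : ∃ d t, l.dropWhile (fun c => decide (c ≠ ':')) = d :: t := by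
      cases hx : l.dropWhile (fun c => decide (c ≠ ':')) with
      | nil => exact absurd hx hne
      | cons d t => exact ⟨d, t, rfl⟩
    have hd : d = ':' := by
      have hhead := List.head?_dropWhile_not (fun c => decide (c ≠ ':')) l
      rw [hdt] at hhead
      simpa using hhead
    subst hd
    rw [hdt] at hdec
    have hnoc : ':' ∉ l.takeWhile (fun c => decide (c ≠ ':')) := by
      intro hm
      have := List.mem_takeWhile_imp hm
      simp at this
    have hlt : t.length < l.length := by
      have := congrArg List.length hdec
      simp at this
      omega
    rw [← hdec, pvSplitColon_append _ _ hnoc]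
    obtain ⟨s, ss, hsplit⟩ : ∃ s ss, pvSplitColon t = s :: ss := by
      cases hx : pvSplitColon t with
      | nil => exact absurd hx (pvSplitColon_ne_nil t)
      | cons s ss => exact ⟨s, ss, rfl⟩
    rw [hsplit]
    have hmain : ((pvParts (l.takeWhile (fun c => decide (c ≠ ':')) :: s :: ss)).map String.toList).flatten
        = pvHeadPart (l.takeWhile (fun c => decide (c ≠ ':'))) ++ ((pvParts (s :: ss)).map String.toList).flatten := by
      simp [pvParts]
    rw [hmain, ← hsplit, ih t.length hlt t rfl, pvSpecC_seg_colon _ _ hnoc]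
  · rw [pvSplitColon_no_colon l hc]
    simp [pvParts, pvSpecC_no_colon l hc]

-- ===== VERDICT (by name: the statement is the Claim_ definition above) =====

theorem syllable_structure_spec : Claim_equal_syllable_structure := by
  intro root_form _
  unfold Spec_syllable_structure syllable_structure syllable_structure_alt
  dsimp only
  rw [pvParts_eq _ (pvSplitColon_ne_nil _)]
  apply String.toList_inj.mp
  rw [PySem.Str.toList_join, PySem.Str.toList_join]
  have hA := pvFoldA_suffix root_form.toList 0 [] (by omega)
  simp only [Nat.cast_zero, List.drop_zero, List.nil_append] at hA
  rw [hA, show ("" : String).toList = ([] : List Char) from rfl, pvJoinE, pvJoinE]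
  rw [pvSpecA_chars, pvParts_flat]
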